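-- pv_equiv track=rewrite | github.com/Gerald-li/HPLC_MS-- | scripts/extract_excel_gui.py | parse_position_args
-- ===== SOURCE A (Python) =====
-- def parse_position_args(position_args):
--     """
--     Parse position arguments in format "cell_range-column_header"
--     Returns list of tuples: (cell_range, column_header)
--     """
--     parsed_positions = []
--
--     for arg in position_args:
--         # Split by last dash to separate cell_range and column_header
--         if '-' in arg:
--             # Find the last dash that separates cell range from column header
--             parts = arg.split('-')
--
--             # Try to find the split point where the left part is a valid cell reference
--             for i in range(len(parts)-1, 0, -1):
--                 left_part = '-'.join(parts[:i])
--                 right_part = '-'.join(parts[i:])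
--
--                 # Check if left_part is a valid cell reference (contains letters and numbers)
--                 if any(char.isdigit() for char in left_part) and any(char.isalpha() for char in left_part):
--                     parsed_positions.append((left_part, right_part))
--                     break
--             else:
--                 # If no valid split found, use the whole string as both cell_range and column_header
--                 parsed_positions.append((arg, arg))
--         else:
--             # No dash found, use the same string for both
--             parsed_positions.append((arg, arg))
--
--     return parsed_positions
-- ===== SOURCE B (Python) =====
-- def _parse_one(arg):
--     if '-' not in arg:
--         return (arg, arg)
--     # Only the last-dash split can ever be valid: the validity test
--     # (has a digit and a letter) is monotone in the prefix length.
--     left, right = arg.rsplit('-', 1)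
--     if any(c.isdigit() for c in left) and any(c.isalpha() for c in left):
--         return (left, right)
--     return (arg, arg)
--
--
-- def parse_position_args(position_args):
--     """
--     Parse position arguments in format "cell_range-column_header"
--     Returns list of tuples: (cell_range, column_header)
--     """
--     return [_parse_one(arg) for arg in position_args]
-- ===== Notes on version B (the rewrite author's own statement) =====
-- stated objective: simpler
-- what changed: Replaces A's split-into-parts plus downward scan over all candidate split points with a single rsplit at the last dash and one digit/letter test, valid because the digit-and-letter predicate is monotone in prefix length so only the last-dash split can succeed.
import Mathlib
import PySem

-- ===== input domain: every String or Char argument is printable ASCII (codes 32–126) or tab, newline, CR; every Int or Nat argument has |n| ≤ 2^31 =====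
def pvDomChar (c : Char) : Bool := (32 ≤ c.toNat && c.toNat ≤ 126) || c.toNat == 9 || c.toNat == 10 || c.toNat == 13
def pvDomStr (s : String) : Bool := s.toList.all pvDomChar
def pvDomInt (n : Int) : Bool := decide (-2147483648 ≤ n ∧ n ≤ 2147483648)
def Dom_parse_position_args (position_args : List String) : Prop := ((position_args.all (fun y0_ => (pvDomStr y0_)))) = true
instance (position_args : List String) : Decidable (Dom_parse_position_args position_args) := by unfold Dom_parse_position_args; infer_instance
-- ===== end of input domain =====

-- B replaces A's downward scan over all candidate split points with a single rsplit at the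
-- last dash (simpler; valid because the digit-and-letter test is monotone in prefix length).

-- ===== PORT A =====
-- inner 'for i in range(len(parts)-1, 0, -1)' loop with its break/else; j is Python's i
def pvAScan (parts : List (List Char)) : Nat → Option (List Char × List Char)
  | 0 => none
  | Nat.succ j =>
      let left_part := PySem.Chars.join ['-'] (parts.take (j + 1))
      let right_part := PySem.Chars.join ['-'] (parts.drop (j + 1))
      if left_part.any PySem.Chars.isdigit && left_part.any PySem.Chars.isalpha then
        some (left_part, right_part)
      else pvAScan parts j

-- one iteration of A's outer loop body
def pvAOne (arg : String) : String × String :=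
  let cs := arg.toList
  if PySem.Chars.isIn ['-'] cs then
    let parts := PySem.Chars.splitOn cs ['-']
    match pvAScan parts (parts.length - 1) with
    | some (l, r) => (String.ofList l, String.ofList r)
    | none => (arg, arg)
  else (arg, arg)

def parse_position_args (position_args : List String) : List (String × String) :=
  position_args.foldl (fun acc arg => acc ++ [pvAOne arg]) []

-- ===== PORT B =====
-- _parse_one; 'arg.rsplit('-', 1)' is ported by hand (split at last '-'), exact since it is
-- only evaluated under the ''-' in arg' guard
def pvBOne (arg : String) : String × String :=
  let cs := arg.toList
  if PySem.Chars.isIn ['-'] cs then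
    let rev := cs.reverse
    let right := (rev.takeWhile (fun c => c != '-')).reverse
    let left := ((rev.dropWhile (fun c => c != '-')).drop 1).reverse
    if left.any PySem.Chars.isdigit && left.any PySem.Chars.isalpha then
      (String.ofList left, String.ofList right)
    else (arg, arg)
  else (arg, arg)

def parse_position_args_alt (position_args : List String) : List (String × String) :=
  position_args.map pvBOne

-- ===== PRECONDITION & SPEC =====
def Spec_parse_position_args (position_args : List String) (out : List (String × String)) : Prop := out = parse_position_args_alt position_args
instance (position_args : List String) (out : List (String × String)) : Decidable (Spec_parse_position_args position_args out) := by unfold Spec_parse_position_args; infer_instance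

-- ===== CLAIM (what is proved, stated in full; the proofs are below) =====
def Claim_equal_parse_position_args : Prop := ∀ (position_args : List String), Dom_parse_position_args position_args → Spec_parse_position_args position_args (parse_position_args position_args)

-- ===== LEMMAS AND PROOFS =====

theorem pvIntercalate_cons_cons (sep x y : List Char) (l : List (List Char)) :
    List.intercalate sep (x :: y :: l) = x ++ sep ++ List.intercalate sep (y :: l) := by
  simp [List.intercalate, List.intersperse]

theorem pvSplitOn_cons_ne (c : Char) (cs : List Char) (h : c ≠ '-') :
    (c :: cs).splitOn '-' = (cs.splitOn '-').modifyHead (c :: ·) := by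
  rw [List.splitOn, List.splitOnP_cons]; simp [h, List.splitOn]

theorem pvSplitOn_cons_self (cs : List Char) :
    ('-' :: cs).splitOn '-' = [] :: cs.splitOn '-' := by
  rw [List.splitOn, List.splitOnP_cons]; simp [List.splitOn]

theorem pvSplitOn_of_not_mem (xs : List Char) (h : '-' ∉ xs) : xs.splitOn '-' = [xs] := by
  induction xs with
  | nil => simp
  | cons c cs ih =>
      simp only [List.mem_cons, not_or] at h
      rw [pvSplitOn_cons_ne c cs (Ne.symm h.1), ih h.2]
      simp

theorem pvIntercalate_take (sep : List Char) (xs : List (List Char)) (m : Nat) :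
    List.intercalate sep (xs.take m) <+: List.intercalate sep xs := by
  induction xs generalizing m with
  | nil => simp
  | cons x xs ih =>
      cases m with
      | zero => simp [List.intercalate]
      | succ m =>
          rw [List.take_succ_cons]
          cases hxs : xs.take m with
          | nil =>
              cases xs with
              | nil => simp
              | cons y ys =>
                  rw [pvIntercalate_cons_cons]
                  rw [show List.intercalate sep [x] = x by simp [List.intercalate]]
                  rw [List.append_assoc]
                  exact List.prefix_append x _
          | cons z zs =>
              cases xs with
              | nil => simp at hxs
              | cons y ys =>
                  rw [pvIntercalate_cons_cons, pvIntercalate_cons_cons,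
                      List.append_assoc, List.append_assoc]
                  refine (List.prefix_append_right_inj _).mpr
                    ((List.prefix_append_right_inj _).mpr ?_)
                  rw [← hxs]; exact ih m

theorem pvSplitOn_ne_nil (cs : List Char) : cs.splitOn '-' ≠ [] :=
  List.splitOnP_ne_nil _ cs

theorem pvSplitOn_go_eq (fuel : Nat) : ∀ (l cur : List Char) (acc : List (List Char)),
    l.length ≤ fuel →
    PySem.Chars.splitOn.go ['-'] fuel l cur acc
      = acc.reverse ++ (l.splitOn '-').modifyHead (cur.reverse ++ ·) := by
  induction fuel with
  | zero =>
      intro l cur acc h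
      have : l = [] := List.length_eq_zero_iff.mp (Nat.le_zero.mp h)
      subst this
      simp [PySem.Chars.splitOn.go]
  | succ f ih =>
      intro l cur acc h
      cases l with
      | nil => simp [PySem.Chars.splitOn.go]
      | cons c rest =>
          by_cases hc : c = '-'
          · subst hc
            rw [show PySem.Chars.splitOn.go ['-'] (f+1) ('-' :: rest) cur acc
                  = PySem.Chars.splitOn.go ['-'] f (List.drop 1 ('-' :: rest)) [] (cur.reverse :: acc) by
                  simp [PySem.Chars.splitOn.go, List.isPrefixOf]]
            rw [List.drop_one, List.tail_cons, ih rest [] _ (by simpa using h),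
                pvSplitOn_cons_self rest]
            cases List.splitOn '-' rest <;> simp
          · rw [show PySem.Chars.splitOn.go ['-'] (f+1) (c :: rest) cur acc
                  = PySem.Chars.splitOn.go ['-'] f rest (c :: cur) acc by
                  simp [PySem.Chars.splitOn.go, List.isPrefixOf, Ne.symm hc]]
            rw [ih rest (c :: cur) acc (by simpa using h), pvSplitOn_cons_ne c rest hc]
            obtain ⟨h0, t0, hsp⟩ := List.exists_cons_of_ne_nil (pvSplitOn_ne_nil rest)
            rw [hsp]
            simp

theorem pvSplitOn_eq (cs : List Char) :
    PySem.Chars.splitOn cs ['-'] = cs.splitOn '-' := by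
  rw [PySem.Chars.splitOn, pvSplitOn_go_eq (cs.length + 1) cs [] [] (by omega)]
  obtain ⟨h0, t0, hsp⟩ := List.exists_cons_of_ne_nil (pvSplitOn_ne_nil cs)
  rw [hsp]; simp

def pvLeft (cs : List Char) : List Char := ((cs.reverse.dropWhile (fun c => c != '-')).drop 1).reverse
def pvRight (cs : List Char) : List Char := (cs.reverse.takeWhile (fun c => c != '-')).reverse

theorem pvTakeWhile_stop (l : List Char) (h : '-' ∈ l) :
    (l.takeWhile (fun c => c != '-')).length ≠ l.length := by
  intro hlen
  have heq : l.takeWhile (fun c => c != '-') = l :=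
    (List.takeWhile_prefix _).eq_of_length hlen
  have := List.takeWhile_eq_self_iff.mp heq '-' h
  simp at this

theorem pvDropWhile_ne_nil (l : List Char) (h : '-' ∈ l) :
    l.dropWhile (fun c => c != '-') ≠ [] := by
  intro hnil
  have := List.dropWhile_eq_nil_iff.mp hnil '-' h
  simp at this

theorem pvRight_cons (c : Char) (rest : List Char) (h : '-' ∈ rest) :
    pvRight (c :: rest) = pvRight rest := by
  unfold pvRight
  rw [List.reverse_cons, List.takeWhile_append,
      if_neg (pvTakeWhile_stop rest.reverse (by simpa using h))]

theorem pvLeft_cons (c : Char) (rest : List Char) (h : '-' ∈ rest) :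
    pvLeft (c :: rest) = c :: pvLeft rest := by
  unfold pvLeft
  rw [List.reverse_cons, List.dropWhile_append]
  rw [if_neg (by simpa [List.isEmpty_iff] using pvDropWhile_ne_nil rest.reverse (by simpa using h))]
  obtain ⟨d, ds, hd⟩ := List.exists_cons_of_ne_nil (pvDropWhile_ne_nil rest.reverse (by simpa using h))
  rw [hd]
  simp

theorem pvRight_dash (rest : List Char) (h : '-' ∉ rest) :
    pvRight ('-' :: rest) = rest := by
  unfold pvRight
  rw [List.reverse_cons, List.takeWhile_append]
  have hall : rest.reverse.takeWhile (fun c => c != '-') = rest.reverse :=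
    List.takeWhile_eq_self_iff.mpr (by intro a ha; simp; intro he; exact h (he ▸ (by simpa using ha)))
  rw [if_pos (by rw [hall])]
  simp

theorem pvLeft_dash (rest : List Char) (h : '-' ∉ rest) :
    pvLeft ('-' :: rest) = [] := by
  unfold pvLeft
  rw [List.reverse_cons, List.dropWhile_append]
  have hall : rest.reverse.dropWhile (fun c => c != '-') = [] :=
    List.dropWhile_eq_nil_iff.mpr (by intro a ha; simp; intro he; exact h (he ▸ (by simpa using ha)))
  rw [if_pos (by rw [hall]; rfl)]
  simp

theorem pvModifyHead_append {α : Type} (f : α → α) (a b : List α) (h : a ≠ []) :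
    (a ++ b).modifyHead f = a.modifyHead f ++ b := by
  cases a with
  | nil => exact absurd rfl h
  | cons x xs => simp

-- the split of cs is the split of its last-dash left part, followed by the right part
theorem pvSplit_last (cs : List Char) (h : '-' ∈ cs) :
    cs.splitOn '-' = (pvLeft cs).splitOn '-' ++ [pvRight cs] := by
  induction cs with
  | nil => simp at h
  | cons c rest ih =>
      by_cases hc : c = '-'
      · subst hc
        by_cases hr : '-' ∈ rest
        · rw [pvSplitOn_cons_self, ih hr, pvLeft_cons '-' rest hr, pvRight_cons '-' rest hr,
              pvSplitOn_cons_self]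
          simp
        · rw [pvSplitOn_cons_self, pvSplitOn_of_not_mem rest hr, pvLeft_dash rest hr,
              pvRight_dash rest hr]
          simp
      · have hr : '-' ∈ rest := by rcases List.mem_cons.mp h with h1 | h1; exact absurd h1.symm hc; exact h1
        rw [pvSplitOn_cons_ne c rest hc, ih hr, pvLeft_cons c rest hr, pvRight_cons c rest hr,
            pvSplitOn_cons_ne c _ hc,
            pvModifyHead_append _ _ _ (pvSplitOn_ne_nil (pvLeft rest))]

-- the digit-and-letter test is monotone: false on a list implies false on any prefix
theorem pvPred_false_of_prefix (l1 l2 : List Char) (hp : l1 <+: l2)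
    (h2 : (l2.any PySem.Chars.isdigit && l2.any PySem.Chars.isalpha) = false) :
    (l1.any PySem.Chars.isdigit && l1.any PySem.Chars.isalpha) = false := by
  rcases Bool.and_eq_false_iff.mp h2 with h | h <;>
    [apply Bool.and_eq_false_iff.mpr ∘ Or.inl; apply Bool.and_eq_false_iff.mpr ∘ Or.inr] <;>
  · rw [List.any_eq_false] at h ⊢
    exact fun x hx => h x (hp.subset hx)

-- if the largest left part fails the digit-and-letter test, the whole scan fails
theorem pvAScan_none (parts : List (List Char)) (k : Nat)
    (hk : ((List.intercalate ['-'] (parts.take k)).any PySem.Chars.isdigit &&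
           (List.intercalate ['-'] (parts.take k)).any PySem.Chars.isalpha) = false) :
    ∀ j, j ≤ k → pvAScan parts j = none := by
  intro j
  induction j with
  | zero => intro _; rfl
  | succ j ihj =>
      intro hj
      have htake : parts.take (j+1) = (parts.take k).take (j+1) := by
        rw [List.take_take, min_eq_left hj]
      have hpre : List.intercalate ['-'] (parts.take (j+1)) <+: List.intercalate ['-'] (parts.take k) := by
        rw [htake]; exact pvIntercalate_take ['-'] (parts.take k) (j+1)
      have hfalse := pvPred_false_of_prefix _ _ hpre hk
      rw [pvAScan]
      simp only [PySem.Chars.join] at *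
      rw [hfalse]
      exact ihj (by omega)

theorem pvOne_eq (arg : String) : pvAOne arg = pvBOne arg := by
  unfold pvAOne pvBOne
  by_cases hin : PySem.Chars.isIn ['-'] arg.toList = true
  · have hmem : '-' ∈ arg.toList :=
      (List.singleton_infix_iff '-' arg.toList).mp ((PySem.Chars.isIn_iff_infix _ _).mp hin)
    simp only [hin, if_true]
    rw [pvSplitOn_eq, pvSplit_last arg.toList hmem]
    obtain ⟨p0, ps, hcons⟩ := List.exists_cons_of_ne_nil (pvSplitOn_ne_nil (pvLeft arg.toList))
    have hlen : ((pvLeft arg.toList).splitOn '-' ++ [pvRight arg.toList]).length - 1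
        = ps.length + 1 := by rw [hcons]; simp
    have hlenS : ((pvLeft arg.toList).splitOn '-').length = ps.length + 1 := by rw [hcons]; simp
    rw [hlen, pvAScan]
    simp only [PySem.Chars.join]
    rw [← hlenS, List.take_left, List.drop_left, List.intercalate_splitOn]
    have hR : List.intercalate ['-'] [pvRight arg.toList] = pvRight arg.toList := by
      simp [List.intercalate]
    rw [hR]
    by_cases hpred : ((pvLeft arg.toList).any PySem.Chars.isdigit &&
        (pvLeft arg.toList).any PySem.Chars.isalpha) = true
    · rw [if_pos hpred, if_pos (by simpa [pvLeft, pvRight] using hpred)]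
      simp [pvLeft, pvRight]
    · rw [if_neg hpred, if_neg (by simpa [pvLeft, pvRight] using hpred)]
      rw [pvAScan_none ((pvLeft arg.toList).splitOn '-' ++ [pvRight arg.toList]) (ps.length + 1)
        (by rw [← hlenS, List.take_left, List.intercalate_splitOn]
            exact Bool.eq_false_iff.mpr hpred)
        (ps.length) (by omega)]
  · simp only [Bool.not_eq_true] at hin
    simp [hin]

-- ===== VERDICT (by name: the statement is the Claim_ definition above) =====
theorem parse_position_args_spec : Claim_equal_parse_position_args := by
  intro position_args _
  unfold Spec_parse_position_args parse_position_args parse_position_args_alt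
  rw [PySem.List.foldl_append_singleton_eq_map]
  exact List.map_congr_left (fun a _ => pvOne_eq a)
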